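-- pv_equiv track=rewrite | github.com/thiagomassensini/xor_dist | algorithms/core.py | high_xor_dist_twins
-- ===== SOURCE A (Python) =====
-- from typing import Iterator, Tuple, List, Dict
--
-- def xor_dist(a: int, b: int) -> int:
--     """
--     Calcula a distância de Hamming (xor_dist) entre dois inteiros.
--
--     xor_dist(a, b) = popcount(a ⊕ b)
--
--     Args:
--         a, b: Inteiros não-negativos
--
--     Returns:
--         Número de bits diferentes entre a e b
--
--     Example:
--         >>> xor_dist(5, 7)  # 101 vs 111
--         1
--         >>> xor_dist(239, 241)  # 11101111 vs 11110001
--         4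
--     """
--     return bin(a ^ b).count('1')
--
-- def twin_primes(primes: List[int]) -> List[Tuple[int, int]]:
--     """
--     Encontra todos os primos gêmeos (gap = 2) na lista.
--
--     Args:
--         primes: Lista de primos
--
--     Returns:
--         Lista de tuplas (p, p+2) de primos gêmeos
--     """
--     prime_set = set(primes)
--     return [(p, p+2) for p in primes if p + 2 in prime_set]
--
-- def high_xor_dist_twins(primes: List[int], threshold: int = 4) -> List[Tuple[int, int, int]]:
--     """
--     Encontra primos gêmeos com xor_dist alto.
--
--     Args:
--         primes: Lista de primos
--         threshold: Mínimo xor_dist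
--
--     Returns:
--         Lista de (p, p+2, xor_dist)
--     """
--     twins = twin_primes(primes)
--     result = []
--
--     for p, q in twins:
--         d = xor_dist(p, q)
--         if d >= threshold:
--             result.append((p, q, d))
--
--     return sorted(result, key=lambda x: -x[2])
-- ===== SOURCE B (Python) =====
-- def high_xor_dist_twins(primes, threshold=4):
--     # One pass: bucket twin pairs by their Hamming distance, then emit buckets
--     # from the largest distance down (a counting/bucket sort replaces the
--     # build-list-then-comparison-sort of the original).
--     prime_set = set(primes)
--     buckets = {}
--     for p in primes:
--         if p + 2 in prime_set:
--             d = bin(p ^ (p + 2)).count('1')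
--             if d >= threshold:
--                 buckets.setdefault(d, []).append((p, p + 2, d))
--     out = []
--     for d in sorted(buckets, reverse=True):
--         out += buckets[d]
--     return out
-- ===== Notes on version B (the rewrite author's own statement) =====
-- stated objective: alternative
-- what changed: Replaces build-twin-list + filter + stable comparison sort with one fused pass that buckets qualifying twin pairs by Hamming distance in a dict, then concatenates the buckets from the largest distance down (a bucket sort over the bounded distance values).
import Mathlib
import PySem

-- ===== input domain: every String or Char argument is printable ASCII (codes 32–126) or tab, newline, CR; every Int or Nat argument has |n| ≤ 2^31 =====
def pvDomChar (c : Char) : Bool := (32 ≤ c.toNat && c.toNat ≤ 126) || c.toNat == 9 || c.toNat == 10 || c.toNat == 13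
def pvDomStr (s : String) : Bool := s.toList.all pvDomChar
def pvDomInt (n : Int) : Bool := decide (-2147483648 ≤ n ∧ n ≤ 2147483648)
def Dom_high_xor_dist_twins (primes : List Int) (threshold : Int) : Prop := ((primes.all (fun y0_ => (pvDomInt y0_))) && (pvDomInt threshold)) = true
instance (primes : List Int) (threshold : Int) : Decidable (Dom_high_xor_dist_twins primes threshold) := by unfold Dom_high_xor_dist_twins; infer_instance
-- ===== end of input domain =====

-- B buckets qualifying twin pairs by Hamming distance in one fused pass and emits the
-- buckets from the largest distance down, instead of A's twin-list + filter + stable sort.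

-- ===== PORT A =====
-- bin(a ^ b).count('1') = popcount of |a ^ b| (PySem.Int.bitCount is Python-exact on negatives)
def xor_dist (a b : Int) : Int := (PySem.Int.bitCount (PySem.Int.bxor a b) : Int)

def twin_primes (primes : List Int) : List (Int × Int) :=
  let prime_set : PySem.Set Int := PySem.Set.ofList primes
  (primes.filter (fun p => PySem.Set.contains prime_set (p + 2))).map (fun p => (p, p + 2))

def high_xor_dist_twins (primes : List Int) (threshold : Int) : List (Int × Int × Int) :=
  let twins := twin_primes primes
  let result := twins.foldl (fun acc pq =>
      let d := xor_dist pq.1 pq.2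
      if d ≥ threshold then acc ++ [(pq.1, pq.2, d)] else acc) []
  PySem.List.sorted result (fun x => -x.2.2) false

-- ===== PORT B =====
-- buckets.setdefault(d, []).append(t)  =  Dict.modify buckets d [] (· ++ [t])
def high_xor_dist_twins_alt (primes : List Int) (threshold : Int) : List (Int × Int × Int) :=
  let prime_set : PySem.Set Int := PySem.Set.ofList primes
  let buckets : PySem.Dict Int (List (Int × Int × Int)) :=
    primes.foldl (fun bk p =>
      if PySem.Set.contains prime_set (p + 2) then
        let d : Int := (PySem.Int.bitCount (PySem.Int.bxor p (p + 2)) : Int)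
        if d ≥ threshold then PySem.Dict.modify bk d [] (fun l => l ++ [(p, p + 2, d)])
        else bk
      else bk) PySem.Dict.empty
  (PySem.List.sorted (PySem.Dict.keys buckets) (fun d => d) true).foldl
    (fun out d => out ++ PySem.Dict.getD buckets d []) []

-- ===== PRECONDITION & SPEC =====
def Spec_high_xor_dist_twins (primes : List Int) (threshold : Int) (out : List (Int × Int × Int)) : Prop := out = high_xor_dist_twins_alt primes threshold
instance (primes : List Int) (threshold : Int) (out : List (Int × Int × Int)) : Decidable (Spec_high_xor_dist_twins primes threshold out) := by unfold Spec_high_xor_dist_twins; infer_instance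

-- ===== CLAIM (what is proved, stated in full; the proofs are below) =====
def Claim_equal_high_xor_dist_twins : Prop := ∀ (primes : List Int) (threshold : Int), Dom_high_xor_dist_twins primes threshold → Spec_high_xor_dist_twins primes threshold (high_xor_dist_twins primes threshold)

-- ===== LEMMAS AND PROOFS =====

-- the stream of emitted triples, in primes order (shared normal form of both ports)
def pvEmit (S : PySem.Set Int) (threshold : Int) (p : Int) : List (Int × Int × Int) :=
  if PySem.Set.contains S (p + 2) then
    (if xor_dist p (p + 2) ≥ threshold then [(p, p + 2, xor_dist p (p + 2))] else [])
  else []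

def pvL (primes : List Int) (threshold : Int) : List (Int × Int × Int) :=
  primes.flatMap (pvEmit (PySem.Set.ofList primes) threshold)

lemma pv_insertBy_append_left {α : Type} (before : α → α → Bool) (x : α) (l r : List α)
    (h : ∀ y ∈ l, before x y = false) :
    PySem.List.insertBy before x (l ++ r) = l ++ PySem.List.insertBy before x r := by
  induction l with
  | nil => simp
  | cons a t ih =>
      have ha : before x a = false := h a (by simp)
      simp only [List.cons_append, PySem.List.insertBy, ha]
      simp [ih (fun y hy => h y (by simp [hy]))]

lemma pv_insertBy_front {α : Type} (before : α → α → Bool) (x : α) (r : List α)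
    (h : ∀ y ∈ r, before x y = true) :
    PySem.List.insertBy before x r = x :: r := by
  cases r with
  | nil => simp [PySem.List.insertBy]
  | cons a t => simp [PySem.List.insertBy, h a (by simp)]

lemma pv_insertBy_flatMap {α : Type} (key : α → Int) (x : α) (ks : List Int)
    (f : Int → List α)
    (hdesc : ks.Pairwise (fun a b => b < a))
    (hmem : ∀ d ∈ ks, ∀ y ∈ f d, key y = d)
    (hnew : key x ∉ ks → f (key x) = []) :
    PySem.List.insertBy (fun a b => decide (-(key a) < -(key b))) x (ks.flatMap f)
    = (if key x ∈ ks then ks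
       else PySem.List.insertBy (fun a b => decide (b < a)) (key x) ks).flatMap
        (fun e => if e = key x then f e ++ [x] else f e) := by
  induction ks with
  | nil =>
      simp only [List.not_mem_nil, List.flatMap_nil, if_false]
      simp [PySem.List.insertBy, hnew (by simp)]
  | cons k t ih =>
      have hdesc' := (List.pairwise_cons.mp hdesc).2
      have hkt : ∀ e ∈ t, e < k := (List.pairwise_cons.mp hdesc).1
      simp only [List.flatMap_cons]
      rcases lt_trichotomy (key x) k with hlt | heq | hgt
      · -- key x < k : skip bucket f k, recurse
        have hpass : ∀ y ∈ f k, (fun a b => decide (-(key a) < -(key b))) x y = false := by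
          intro y hy
          have := hmem k (by simp) y hy
          simp [this]; omega
        rw [pv_insertBy_append_left _ _ _ _ hpass]
        have hnotk : key x ≠ k := by omega
        have hmem' : ∀ d ∈ t, ∀ y ∈ f d, key y = d := fun d hd => hmem d (by simp [hd])
        have hnew' : key x ∉ t → f (key x) = [] := by
          intro h; exact hnew (by simp [hnotk, h])
        rw [ih hdesc' hmem' hnew']
        have hfk : (if k = key x then f k ++ [x] else f k) = f k := by simp [Ne.symm hnotk]
        by_cases hx : key x ∈ t
        · simp only [List.mem_cons, hx, or_true, if_true, List.flatMap_cons, hfk]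
        · have : key x ∉ k :: t := by simp [hnotk, hx]
          simp only [hx, if_false, this]
          have hbk : (decide (k < key x)) = false := by simp; omega
          simp only [PySem.List.insertBy, hbk]
          simp [List.flatMap_cons, hfk]
      · -- key x = k : append to bucket f k
        subst heq
        have hpass : ∀ y ∈ f (key x), (fun a b => decide (-(key a) < -(key b))) x y = false := by
          intro y hy
          have := hmem (key x) (by simp) y hy
          simp [this]
        rw [pv_insertBy_append_left _ _ _ _ hpass]
        have hfront : ∀ y ∈ t.flatMap f, (fun a b => decide (-(key a) < -(key b))) x y = true := by
          intro y hy
          obtain ⟨d, hd, hyd⟩ := List.mem_flatMap.mp hy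
          have h1 := hmem d (by simp [hd]) y hyd
          have h2 := hkt d hd
          simp [h1]; omega
        rw [pv_insertBy_front _ _ _ hfront]
        have hx : key x ∈ key x :: t := by simp
        simp only [hx, if_true, List.flatMap_cons]
        have hcong : t.flatMap (fun e => if e = key x then f e ++ [x] else f e) = t.flatMap f := by
          apply List.flatMap_congr
          intro e he
          have : e ≠ key x := by have := hkt e he; omega
          simp [this]
        rw [hcong]
        simp
      · -- key x > k : goes in front of everything
        have hfront : ∀ y ∈ f k ++ t.flatMap f, (fun a b => decide (-(key a) < -(key b))) x y = true := by
          intro y hy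
          rcases List.mem_append.mp hy with hy | hy
          · have := hmem k (by simp) y hy; simp [this]; omega
          · obtain ⟨d, hd, hyd⟩ := List.mem_flatMap.mp hy
            have h1 := hmem d (by simp [hd]) y hyd
            have h2 := hkt d hd
            simp [h1]; omega
        rw [pv_insertBy_front _ _ _ hfront]
        have hxk : key x ∉ k :: t := by
          simp only [List.mem_cons]
          push Not
          constructor
          · omega
          · intro h; have := hkt _ h; omega
        simp only [hxk, if_false]
        have hins : PySem.List.insertBy (fun a b => decide (b < a)) (key x) (k :: t)
            = key x :: k :: t := by
          apply pv_insertBy_front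
          intro y hy
          rcases List.mem_cons.mp hy with rfl | hy
          · simp; omega
          · have := hkt y hy; simp; omega
        rw [hins]
        simp only [List.flatMap_cons]
        have hfx : f (key x) = [] := hnew hxk
        have hcong : t.flatMap (fun e => if e = key x then f e ++ [x] else f e) = t.flatMap f := by
          apply List.flatMap_congr
          intro e he
          have : e ≠ key x := by have := hkt e he; omega
          simp [this]
        have hkx : k ≠ key x := by omega
        simp [hfx, hkx, hcong]

lemma pv_sorted_negkey_eq {α : Type} (key : α → Int) (L : List α) :
    PySem.List.sorted L (fun x => -(key x)) false
    = (PySem.List.sorted (PySem.List.dedup (L.map key)) (fun d => d) true).flatMap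
        (fun d => L.filter (fun y => key y == d)) := by
  induction L using List.reverseRecOn with
  | nil => simp [PySem.List.sorted, PySem.List.dedup, PySem.Set.ofList]
  | append_singleton L x ih =>
      -- LHS step
      have hL : PySem.List.sorted (L ++ [x]) (fun x => -(key x)) false
          = PySem.List.insertBy (fun a b => decide (-(key a) < -(key b))) x
              (PySem.List.sorted L (fun x => -(key x)) false) := by
        simp [PySem.List.sorted, List.foldl_append]
      set ks := PySem.List.sorted (PySem.List.dedup (L.map key)) (fun d => d) true with hks
      have hdesc : ks.Pairwise (fun a b => b < a) := by
        have hle : ks.Pairwise (fun a b => b ≤ a) := PySem.List.sorted_pairwise_rev _ _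
        have hperm : ks.Perm (PySem.List.dedup (L.map key)) := PySem.List.sorted_perm _ _ _
        have hnd : ks.Nodup := hperm.nodup_iff.mpr (PySem.List.nodup_dedup _)
        have := hle.and (List.nodup_iff_pairwise_ne.mp hnd)   -- name guess
        exact this.imp (by rintro a b ⟨h1, h2⟩; omega)
      have hmem : ∀ d ∈ ks, ∀ y ∈ (fun d => L.filter (fun y => key y == d)) d, key y = d := by
        intro d hd y hy
        simpa using (List.mem_filter.mp hy).2
      have hnew : key x ∉ ks → L.filter (fun y => key y == key x) = [] := by
        intro h
        rw [List.filter_eq_nil_iff]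
        intro y hy hc
        apply h
        rw [hks, PySem.List.mem_sorted, PySem.List.mem_dedup]
        simp at hc
        exact List.mem_map.mpr ⟨y, hy, hc⟩
      rw [hL, ih, pv_insertBy_flatMap key x ks _ hdesc hmem hnew]
      -- RHS step
      have hmapstep : (L ++ [x]).map key = L.map key ++ [key x] := by simp
      have hded : PySem.List.dedup (L.map key ++ [key x])
          = PySem.Set.add (PySem.List.dedup (L.map key)) (key x) := by
        simp only [PySem.List.dedup, PySem.Set.ofList_eq_foldl, List.foldl_append, List.foldl_cons, List.foldl_nil]
      have hfilter : ∀ d, (L ++ [x]).filter (fun y => key y == d)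
          = (if d = key x then L.filter (fun y => key y == d) ++ [x] else L.filter (fun y => key y == d)) := by
        intro d
        rw [List.filter_append]
        by_cases h : d = key x <;> simp [h, beq_iff_eq]
        · intro h'; exact h (h'.symm)  -- maybe directions
      rw [hmapstep, hded]
      by_cases hx : key x ∈ ks
      · have hxd : key x ∈ PySem.List.dedup (L.map key) := by
          rw [hks] at hx
          simpa [PySem.List.mem_sorted] using hx
        have hadd : PySem.Set.add (PySem.List.dedup (L.map key)) (key x) = PySem.List.dedup (L.map key) := by
          have hc : PySem.Set.contains (PySem.List.dedup (L.map key)) (key x) = true := by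
            simpa [PySem.Set.contains] using hxd
          simp only [PySem.Set.add, hc, if_true]
        rw [hadd, ← hks]
        simp only [hx, if_true]
        apply List.flatMap_congr
        intro d hd
        rw [hfilter d]
      · have hxd : key x ∉ PySem.List.dedup (L.map key) := by
          intro h
          apply hx
          rw [hks]
          simpa [PySem.List.mem_sorted] using h
        have hadd : PySem.Set.add (PySem.List.dedup (L.map key)) (key x) = PySem.List.dedup (L.map key) ++ [key x] := by
          have hc : PySem.Set.contains (PySem.List.dedup (L.map key)) (key x) = false := by
            simpa [PySem.Set.contains] using hxd
          simp only [PySem.Set.add, hc, Bool.false_eq_true, if_false]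
        rw [hadd]
        have hsortstep : PySem.List.sorted (PySem.List.dedup (L.map key) ++ [key x]) (fun d => d) true
            = PySem.List.insertBy (fun a b => decide (b < a)) (key x) ks := by
          simp [hks, PySem.List.sorted, List.foldl_append]
        rw [hsortstep]
        simp only [hx, if_false]
        apply List.flatMap_congr
        intro d hd
        rw [hfilter d]

lemma pv_chain (S : PySem.Set Int) (threshold : Int) (xs : List Int) :
    (((xs.filter (fun p => PySem.Set.contains S (p + 2))).map (fun p => (p, p + 2))).filter
        (fun pq => decide (xor_dist pq.1 pq.2 ≥ threshold))).map
      (fun pq : Int × Int => (pq.1, pq.2, xor_dist pq.1 pq.2))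
    = xs.flatMap (pvEmit S threshold) := by
  induction xs with
  | nil => simp
  | cons p t ih =>
      simp only [List.filter_cons, List.flatMap_cons, pvEmit]
      by_cases h1 : PySem.Set.contains S (p + 2) = true
      · simp only [h1, if_true, List.map_cons, List.filter_cons]
        by_cases h2 : xor_dist p (p + 2) ≥ threshold
        · simp [h2]
          simpa using ih
        · simp [h2]
          simpa using ih
      · have hm : ¬ (p + 2 ∈ S) := by simpa [PySem.Set.contains] using h1
        simp [hm]
        simpa using ih

lemma pv_A_eq (primes : List Int) (threshold : Int) :
    high_xor_dist_twins primes threshold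
    = PySem.List.sorted (pvL primes threshold) (fun x => -(x.2.2)) false := by
  simp only [high_xor_dist_twins, twin_primes]
  congr 1
  rw [PySem.List.foldl_append_ite (p := fun pq : Int × Int => xor_dist pq.1 pq.2 ≥ threshold)
      (f := fun pq : Int × Int => (pq.1, pq.2, xor_dist pq.1 pq.2))]
  simpa using pv_chain (PySem.Set.ofList primes) threshold primes

lemma pv_B_fold_eq (S : PySem.Set Int) (threshold : Int) (xs : List Int)
    (bk : PySem.Dict Int (List (Int × Int × Int))) :
    xs.foldl (fun bk p =>
      if PySem.Set.contains S (p + 2) then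
        (if (PySem.Int.bitCount (PySem.Int.bxor p (p + 2)) : Int) ≥ threshold then
          PySem.Dict.modify bk ((PySem.Int.bitCount (PySem.Int.bxor p (p + 2)) : Int)) []
            (fun l => l ++ [(p, p + 2, (PySem.Int.bitCount (PySem.Int.bxor p (p + 2)) : Int))])
        else bk)
      else bk) bk
    = (xs.flatMap (pvEmit S threshold)).foldl
        (fun bk t => PySem.Dict.modify bk t.2.2 [] (fun l => l ++ [t])) bk := by
  induction xs generalizing bk with
  | nil => simp
  | cons p t ih =>
      simp only [List.foldl_cons, List.flatMap_cons, List.foldl_append, pvEmit, xor_dist]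
      by_cases h1 : PySem.Set.contains S (p + 2) = true
      · rw [if_pos h1, if_pos h1]
        by_cases h2 : ((PySem.Int.bitCount (PySem.Int.bxor p (p + 2)) : Int) ≥ threshold)
        · rw [if_pos h2, if_pos h2]
          simp only [List.foldl_cons]
          exact ih _
        · rw [if_neg h2, if_neg h2]
          simp only [List.foldl_nil]
          exact ih _
      · rw [if_neg h1, if_neg h1]
        simp only [List.foldl_nil]
        exact ih _

lemma pv_getD_group (ws : List (Int × Int × Int)) (bk : PySem.Dict Int (List (Int × Int × Int))) (d : Int) :
    (ws.foldl (fun bk t => PySem.Dict.modify bk t.2.2 [] (fun l => l ++ [t])) bk).getD d []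
    = bk.getD d [] ++ ws.filter (fun t => t.2.2 == d) := by
  induction ws generalizing bk with
  | nil => simp
  | cons t ws ih =>
      simp only [List.foldl_cons, List.filter_cons, ih]
      rw [PySem.Dict.getD_modify]
      by_cases h : d = t.2.2
      · simp [h]
      · have : (t.2.2 == d) = false := by simpa using fun hh => h hh.symm
        simp [h, this]

lemma pv_keys_group (primes : List Int) (threshold : Int) :
    ((pvL primes threshold).foldl
        (fun bk t => PySem.Dict.modify bk t.2.2 [] (fun l => l ++ [t])) PySem.Dict.empty).keys
    = PySem.List.dedup ((pvL primes threshold).map (fun t => t.2.2)) := by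
  rw [PySem.Dict.keys_foldl_modify_key]
  simp [PySem.Set.update, PySem.Dict.keys_empty, PySem.List.dedup, PySem.Set.ofList_eq_foldl]

-- ===== VERDICT (by name: the statement is the Claim_ definition above) =====
theorem high_xor_dist_twins_spec : Claim_equal_high_xor_dist_twins := by
  intro primes threshold _
  unfold Spec_high_xor_dist_twins
  rw [pv_A_eq, pv_sorted_negkey_eq (fun t : Int × Int × Int => t.2.2)]
  simp only [high_xor_dist_twins_alt]
  rw [pv_B_fold_eq (PySem.Set.ofList primes) threshold primes PySem.Dict.empty]
  rw [PySem.List.foldl_append_eq_flatMap]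
  rw [show (primes.flatMap (pvEmit (PySem.Set.ofList primes) threshold)) = pvL primes threshold from rfl]
  rw [pv_keys_group]
  simp only [List.nil_append]
  apply List.flatMap_congr
  intro d hd
  rw [pv_getD_group]
  simp
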